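-- pv_equiv track=rewrite | github.com/JakubSapko/engineering-thesis-anki-exporter | etae/utils/utils.py | list_of_dicts_to_dataframe_format
-- ===== SOURCE A (Python) =====
-- from typing import Any, Literal, Optional
--
-- def list_of_dicts_to_dataframe_format(
--     list_to_parse: list[dict[str, Any]]
-- ) -> dict[str, list[Any]]:
--     dataframe_dict: dict[str, list[Any]] = {}
--     for index, card in enumerate(list_to_parse):
--         for key, value in card.items():
--             if key not in dataframe_dict:
--                 dataframe_dict.update({key: [value]})
--             else:
--                 dataframe_dict[key].append(value)
--     return dataframe_dict
-- ===== SOURCE B (Python) =====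
-- def list_of_dicts_to_dataframe_format(list_to_parse):
--     # Column-major: first collect the distinct keys in first-encounter order,
--     # then build each column with one scan per key.
--     keys = []
--     for card in list_to_parse:
--         for key in card:
--             if key not in keys:
--                 keys.append(key)
--     return {key: [card[key] for card in list_to_parse if key in card] for key in keys}
-- ===== Notes on version B (the rewrite author's own statement) =====
-- stated objective: alternative
-- what changed: Row-major dict accumulation (append per cell into a growing dict) replaced by a column-major pass: one scan collecting distinct keys in first-encounter order, then one scan per key building its whole column.
import Mathlib
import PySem

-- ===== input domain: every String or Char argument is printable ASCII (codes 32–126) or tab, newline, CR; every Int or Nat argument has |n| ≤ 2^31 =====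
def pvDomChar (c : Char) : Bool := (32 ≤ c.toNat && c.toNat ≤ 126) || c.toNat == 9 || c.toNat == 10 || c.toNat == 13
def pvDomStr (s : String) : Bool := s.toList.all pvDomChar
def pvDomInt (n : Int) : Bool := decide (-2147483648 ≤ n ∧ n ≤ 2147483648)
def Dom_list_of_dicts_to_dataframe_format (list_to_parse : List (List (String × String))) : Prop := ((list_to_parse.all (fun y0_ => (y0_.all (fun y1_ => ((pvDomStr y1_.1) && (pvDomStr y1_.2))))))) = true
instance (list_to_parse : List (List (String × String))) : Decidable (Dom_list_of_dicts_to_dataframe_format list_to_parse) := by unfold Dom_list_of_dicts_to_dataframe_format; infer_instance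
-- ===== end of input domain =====

-- B replaces A's row-major dict accumulation by a column-major pass (distinct keys first,
-- then one scan per key); equivalence is about the return value, neither mutates its input.

-- ===== PORT A =====
-- literal port: dicts become PySem.Dict, the result is returned as its items list
def list_of_dicts_to_dataframe_format (list_to_parse : List (List (String × String))) : List (String × List String) :=
  (list_to_parse.foldl
    (fun dataframe_dict card =>
      card.foldl
        (fun dataframe_dict kv =>
          if dataframe_dict.contains kv.1 = false then
            dataframe_dict.insert kv.1 [kv.2]
          else
            dataframe_dict.modify kv.1 [] (fun l => l ++ [kv.2]))
        dataframe_dict)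
    PySem.Dict.empty).items

-- ===== PORT B =====
-- first pass: distinct keys in first-encounter order
def pvAltKeys (list_to_parse : List (List (String × String))) : List String :=
  list_to_parse.foldl
    (fun keys card =>
      card.foldl (fun keys kv => if keys.contains kv.1 then keys else keys ++ [kv.1]) keys)
    []

def list_of_dicts_to_dataframe_format_alt (list_to_parse : List (List (String × String))) : List (String × List String) :=
  (pvAltKeys list_to_parse).map
    (fun key => (key, list_to_parse.filterMap (fun card => (PySem.Dict.mk card).get? key)))

-- ===== PRECONDITION & SPEC =====
-- Pre_ excludes association lists carrying a duplicate key inside one card: such inputs do not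
-- represent Python dicts (a Python dict cannot hold a key twice), so A never receives them.
def Pre_list_of_dicts_to_dataframe_format (list_to_parse : List (List (String × String))) : Prop :=
  ∀ card ∈ list_to_parse, (card.map Prod.fst).Nodup
instance (list_to_parse : List (List (String × String))) : Decidable (Pre_list_of_dicts_to_dataframe_format list_to_parse) := by unfold Pre_list_of_dicts_to_dataframe_format; infer_instance
def pvWitness_list_of_dicts_to_dataframe_format : (List (List (String × String))) :=
  [[("a", "1"), ("b", "2")], [("a", "3")]]

def Spec_list_of_dicts_to_dataframe_format (list_to_parse : List (List (String × String))) (out : List (String × List String)) : Prop := out = list_of_dicts_to_dataframe_format_alt list_to_parse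
instance (list_to_parse : List (List (String × String))) (out : List (String × List String)) : Decidable (Spec_list_of_dicts_to_dataframe_format list_to_parse out) := by unfold Spec_list_of_dicts_to_dataframe_format; infer_instance

-- ===== CLAIM (what is proved, stated in full; the proofs are below) =====
def Claim_equal_list_of_dicts_to_dataframe_format : Prop := ∀ (list_to_parse : List (List (String × String))), Dom_list_of_dicts_to_dataframe_format list_to_parse → Pre_list_of_dicts_to_dataframe_format list_to_parse → Spec_list_of_dicts_to_dataframe_format list_to_parse (list_of_dicts_to_dataframe_format list_to_parse)

-- ===== LEMMAS AND PROOFS =====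

-- a nested foldl over rows is a foldl over the flattened cell list
theorem pv_foldl_nested {α β : Type} (f : α → β → α) :
    ∀ (rows : List (List β)) (init : α),
      rows.foldl (fun acc card => card.foldl f acc) init = (rows.flatMap id).foldl f init := by
  intro rows
  induction rows with
  | nil => intro init; simp
  | cons c rs ih => intro init; simp [List.foldl_append, ih]

-- A's branched step is extensionally the pure modify step
theorem pv_stepA_eq_modify (d : PySem.Dict String (List String)) (kv : String × String) :
    (if d.contains kv.1 = false then d.insert kv.1 [kv.2]
     else d.modify kv.1 [] (fun l => l ++ [kv.2])) =
    d.modify kv.1 [] (fun l => l ++ [kv.2]) := by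
  by_cases h : d.contains kv.1
  · simp [h]
  · simp only [h]
    cases d with
    | mk items =>
      simp only [PySem.Dict.contains, PySem.Dict.insert, PySem.Dict.modify, PySem.Dict.getD,
        PySem.Dict.get?] at *
      have hf : List.find? (fun p => p.1 == kv.1) items = none := by
        rw [List.find?_eq_none]
        intro p hp
        simp only [List.any_eq_true, not_exists, not_and] at h
        simpa using h p hp
      simp [h, hf]

-- per-card: the values of a no-duplicate card at key k are exactly its first-match lookup
theorem pv_card_filter (k : String) :
    ∀ (card : List (String × String)), (card.map Prod.fst).Nodup →
      ((card.filter (fun p => p.1 == k)).map Prod.snd) = ((PySem.Dict.mk card).get? k).toList := by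
  intro card
  induction card with
  | nil => intro _; simp [PySem.Dict.get?]
  | cons p rest ih =>
    intro hnd
    simp only [List.map_cons, List.nodup_cons] at hnd
    rw [List.filter_cons, PySem.Dict.get?_mk_cons]
    by_cases h : p.1 = k
    · subst h
      have : (rest.filter (fun q => q.1 == p.1)) = [] := by
        rw [List.filter_eq_nil_iff]
        intro q hq
        simp only [beq_iff_eq]
        exact fun he => hnd.1 (he ▸ List.mem_map_of_mem hq)
      simp [this]
    · simp only [beq_iff_eq, h]
      simpa using ih hnd.2

theorem pv_filterMap_eq_flatMap_toList {α β : Type} (f : α → Option β) :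
    ∀ (l : List α), l.filterMap f = l.flatMap (fun a => (f a).toList) := by
  intro l
  induction l with
  | nil => rfl
  | cons a l ih => cases h : f a <;> simp [h, ih]

-- B's column at key k equals the flattened-cell filter, given no duplicate keys per card
theorem pv_column (rows : List (List (String × String))) (k : String)
    (h : ∀ card ∈ rows, (card.map Prod.fst).Nodup) :
    ((rows.flatMap id).filter (fun p => p.1 == k)).map Prod.snd =
      rows.filterMap (fun card => (PySem.Dict.mk card).get? k) := by
  rw [pv_filterMap_eq_flatMap_toList]
  rw [List.filter_flatMap, List.map_flatMap]
  refine List.flatMap_congr ?_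
  intro card hc
  exact pv_card_filter k card (h card hc)

-- B's key pass is Set.ofList of the flattened keys
theorem pv_altKeys_eq (rows : List (List (String × String))) :
    pvAltKeys rows = PySem.Set.ofList ((rows.flatMap id).map Prod.fst) := by
  unfold pvAltKeys
  rw [pv_foldl_nested (fun keys kv => if keys.contains kv.1 then keys else keys ++ [kv.1]) rows []]
  rw [PySem.Set.ofList_eq_foldl, List.foldl_map]
  rfl

theorem pv_A_eq_modify_fold (rows : List (List (String × String))) :
    list_of_dicts_to_dataframe_format rows =
      ((rows.flatMap id).foldl (fun d kv => d.modify kv.1 [] (fun l => l ++ [kv.2]))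
        PySem.Dict.empty).items := by
  unfold list_of_dicts_to_dataframe_format
  rw [pv_foldl_nested]
  congr 2
  funext d kv
  exact pv_stepA_eq_modify d kv

-- ===== VERDICT (by name: the statement is the Claim_ definition above) =====
theorem list_of_dicts_to_dataframe_format_spec : Claim_equal_list_of_dicts_to_dataframe_format := by
  intro rows _ hpre
  unfold Spec_list_of_dicts_to_dataframe_format
  rw [pv_A_eq_modify_fold]
  set flat := rows.flatMap id with hflat
  set d := (flat.foldl (fun d kv => d.modify kv.1 [] (fun l => l ++ [kv.2])) PySem.Dict.empty) with hd
  have hkeys : d.keys = PySem.Set.ofList (flat.map Prod.fst) := by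
    rw [hd, PySem.Dict.keys_foldl_modify_key]
    simp [PySem.Dict.keys_empty, PySem.Set.update]
    rw [PySem.Set.ofList_eq_foldl]
  have hnodup : d.keys.Nodup := by
    rw [hkeys]; exact PySem.Set.nodup_ofList _
  rw [PySem.Dict.items_eq_map_keys d hnodup []]
  unfold list_of_dicts_to_dataframe_format_alt
  rw [pv_altKeys_eq, hkeys, ← hflat]
  refine List.map_congr_left ?_
  intro k _
  refine Prod.ext rfl ?_
  simp only
  rw [hd, PySem.Dict.getD_foldl_modify_append, PySem.Dict.getD_empty, List.nil_append]
  exact pv_column rows k hpre
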